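-- pv_equiv track=rewrite | github.com/maxiballerini/teoria-de-la-info | Untitled-1.py | crear_matriz_transicion
-- ===== SOURCE A (Python) =====
-- def crear_matriz_transicion(vector_archivo):
--     """
--     Crea una matriz de transición a partir de una secuencia de caracteres.
--
--     Args:
--         sec (str): La secuencia de caracteres.
--
--     Returns:
--         dict: Una matriz de transición representada como un diccionario de diccionarios.
--         list: Lista de caracteres únicos en la secuencia.
--     """
--     # Obtener caracteres únicos
--     caracteres = sorted(set(vector_archivo))
--     num_caracteres = len(caracteres)
--
--     # Crear una matriz de transición inicializada en 0
--     matriz_transicion = {c1: {c2: 0 for c2 in caracteres} for c1 in caracteres}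
--
--     # Rellenar la matriz con las frecuencias de transición
--     for i in range(len(vector_archivo) - 1):
--         caracter_actual = vector_archivo[i]
--         caracter_siguiente = vector_archivo[i + 1]
--         matriz_transicion[caracter_siguiente][caracter_actual] += 1
--
--     return matriz_transicion, caracteres
-- ===== SOURCE B (Python) =====
-- def crear_matriz_transicion(vector_archivo):
--     # Brute-force per-cell counting: for every (c1, c2) cell of the dense matrix,
--     # scan the adjacent pairs and count those whose siguiente==c1 and actual==c2.
--     # No counting structure and no in-place increments at all; O(k^2 * n) instead
--     # of A's O(n + k^2), but a completely different traversal of the data.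
--     caracteres = sorted(set(vector_archivo))
--     pares = list(zip(vector_archivo, vector_archivo[1:]))
--     matriz_transicion = {
--         c1: {c2: sum(1 for (actual, siguiente) in pares
--                      if siguiente == c1 and actual == c2)
--              for c2 in caracteres}
--         for c1 in caracteres}
--     return matriz_transicion, caracteres
-- ===== Notes on version B (the rewrite author's own statement) =====
-- stated objective: alternative
-- what changed: B abandons the counting pass entirely: it materializes the dense sorted matrix directly, computing each cell (c1,c2) by a fresh scan of the adjacent-pair list (count of pairs with siguiente==c1, actual==c2), instead of A's single pass that increments a pre-allocated zero matrix in place.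
import Mathlib
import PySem

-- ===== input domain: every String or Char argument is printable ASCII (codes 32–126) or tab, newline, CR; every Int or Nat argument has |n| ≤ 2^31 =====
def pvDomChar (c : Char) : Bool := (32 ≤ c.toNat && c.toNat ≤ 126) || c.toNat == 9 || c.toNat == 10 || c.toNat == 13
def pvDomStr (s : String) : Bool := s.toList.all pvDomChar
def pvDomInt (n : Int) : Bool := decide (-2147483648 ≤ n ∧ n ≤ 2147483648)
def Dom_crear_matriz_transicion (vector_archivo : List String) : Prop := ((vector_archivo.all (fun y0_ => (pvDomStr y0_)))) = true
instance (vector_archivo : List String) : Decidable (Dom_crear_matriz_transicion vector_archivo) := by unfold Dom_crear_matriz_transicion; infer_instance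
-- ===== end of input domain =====

-- B re-implements crear_matriz_transicion by computing every dense-matrix cell with its own
-- scan of the adjacent-pair list (no counting structure, no in-place increments); A and B
-- agree on every input.
-- ===== PORT A =====
-- A: sorted unique strings, zero matrix as dict-of-dicts, then an index loop incrementing
-- matriz[siguiente][actual].  Dict.modify is exact here: the keys are always present, so
-- Python's d[k] += 1 never raises.  pyGetD with default "" is exact: every index is in range.
def crear_matriz_transicion (vector_archivo : List String) : (List (String × List (String × Int))) × List String :=
  let caracteres := PySem.List.sorted (PySem.Set.ofList vector_archivo) (fun x => x) false
  let matriz0 : PySem.Dict String (PySem.Dict String Int) :=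
    PySem.Dict.ofList (caracteres.map (fun c1 =>
      (c1, PySem.Dict.ofList (caracteres.map (fun c2 => (c2, (0 : Int)))))))
  let matriz := (PySem.List.pyRange 0 ((vector_archivo.length : Int) - 1) 1).foldl
    (fun m i =>
      let caracter_actual := PySem.List.pyGetD vector_archivo i ""
      let caracter_siguiente := PySem.List.pyGetD vector_archivo (i + 1) ""
      m.modify caracter_siguiente PySem.Dict.empty
        (fun row => row.modify caracter_actual 0 (· + 1)))
    matriz0
  (matriz.items.map (fun p => (p.1, p.2.items)), caracteres)

-- ===== PORT B =====
-- B: the dense matrix is built directly; each cell (c1, c2) is a fresh scan of the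
-- adjacent-pair list counting pairs with siguiente = c1 and actual = c2 (the
-- 'sum(1 for … if …)' generator ported as the obvious foldl).
def crear_matriz_transicion_alt (vector_archivo : List String) : (List (String × List (String × Int))) × List String :=
  let caracteres := PySem.List.sorted (PySem.Set.ofList vector_archivo) (fun x => x) false
  let pares := vector_archivo.zip (PySem.List.slice vector_archivo (some 1) none)
  let matriz_transicion := caracteres.map (fun c1 =>
    (c1, caracteres.map (fun c2 =>
      (c2, pares.foldl (fun acc p => if p.2 == c1 && p.1 == c2 then acc + 1 else acc) (0 : Int)))))
  (matriz_transicion, caracteres)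

-- ===== PRECONDITION & SPEC =====
def Spec_crear_matriz_transicion (vector_archivo : List String) (out : (List (String × List (String × Int))) × List String) : Prop := out = crear_matriz_transicion_alt vector_archivo
instance (vector_archivo : List String) (out : (List (String × List (String × Int))) × List String) : Decidable (Spec_crear_matriz_transicion vector_archivo out) := by unfold Spec_crear_matriz_transicion; infer_instance

-- ===== CLAIM (what is proved, stated in full; the proofs are below) =====
def Claim_equal_crear_matriz_transicion : Prop := ∀ (vector_archivo : List String), Dom_crear_matriz_transicion vector_archivo → Spec_crear_matriz_transicion vector_archivo (crear_matriz_transicion vector_archivo)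

-- ===== LEMMAS AND PROOFS =====

-- proof-only helper: the dense matrix tabulated from a count function
def pvTab (cs : List String) (g : String → String → Int) : PySem.Dict String (PySem.Dict String Int) :=
  PySem.Dict.mk (cs.map (fun c1 => (c1, PySem.Dict.mk (cs.map (fun c2 => (c2, g c1 c2))))))

theorem pv_find?_map {ν : Type} (cs : List String) (f : String → ν) (k : String) (hk : k ∈ cs) :
    List.find? (fun p => p.1 == k) (cs.map (fun c => (c, f c))) = some (k, f k) := by
  induction cs with
  | nil => cases hk
  | cons c cs ih =>
    by_cases h : c = k
    · subst h; simp
    · rcases List.mem_cons.1 hk with hk' | hk'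
      · exact absurd hk'.symm h
      · simpa [List.find?, h] using ih hk'

theorem pv_getD_map {ν : Type} (cs : List String) (f : String → ν) (k : String) (d0 : ν)
    (hk : k ∈ cs) :
    (PySem.Dict.mk (cs.map (fun c => (c, f c)))).getD k d0 = f k := by
  simp [PySem.Dict.getD, PySem.Dict.get?, pv_find?_map cs f k hk]

theorem pv_contains_map {ν : Type} (cs : List String) (f : String → ν) (k : String)
    (hk : k ∈ cs) :
    (PySem.Dict.mk (cs.map (fun c => (c, f c)))).contains k = true := by
  simp only [PySem.Dict.contains, List.any_eq_true]
  exact ⟨(k, f k), List.mem_map.2 ⟨k, hk, rfl⟩, by simp⟩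

theorem pv_modify_map {ν : Type} (cs : List String) (f : String → ν) (k : String)
    (hk : k ∈ cs) (d0 : ν) (F : ν → ν) :
    (PySem.Dict.mk (cs.map (fun c => (c, f c)))).modify k d0 F
      = PySem.Dict.mk (cs.map (fun c => (c, if c = k then F (f c) else f c))) := by
  unfold PySem.Dict.modify PySem.Dict.insert
  rw [pv_contains_map cs f k hk, pv_getD_map cs f k d0 hk]
  simp only [if_true]
  congr 1
  rw [List.map_map]
  apply List.map_congr_left
  intro c _
  by_cases h : c = k
  · subst h; simp
  · simp [h]

theorem pv_insert_fresh {ν : Type} (d : PySem.Dict String ν) (k : String) (v : ν)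
    (h : ∀ p ∈ d.items, p.1 ≠ k) :
    d.insert k v = PySem.Dict.mk (d.items ++ [(k, v)]) := by
  unfold PySem.Dict.insert
  have hc : d.contains k = false := by
    simp only [PySem.Dict.contains, List.any_eq_false]
    intro p hp
    simpa using h p hp
  rw [hc]
  simp

theorem pv_update_fresh {ν : Type} (cs : List String) (f : String → ν) :
    ∀ acc : List (String × ν), cs.Nodup → (∀ c ∈ cs, ∀ p ∈ acc, p.1 ≠ c) →
    (PySem.Dict.mk acc).update (cs.map (fun c => (c, f c)))
      = PySem.Dict.mk (acc ++ cs.map (fun c => (c, f c))) := by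
  induction cs with
  | nil => intro acc _ _; simp [PySem.Dict.update]
  | cons c cs ih =>
    intro acc hnd hfresh
    have h1 : (PySem.Dict.mk acc).insert c (f c) = PySem.Dict.mk (acc ++ [(c, f c)]) :=
      pv_insert_fresh _ _ _ (fun p hp => hfresh c (by simp) p hp)
    simp only [List.map_cons, PySem.Dict.update, List.foldl_cons]
    have h2 := ih (acc ++ [(c, f c)]) hnd.of_cons (by
      intro c' hc' p hp
      rcases List.mem_append.1 hp with hp | hp
      · exact hfresh c' (by simp [hc']) p hp
      · have : p = (c, f c) := by simpa using hp
        subst this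
        intro heq
        exact (List.nodup_cons.1 hnd).1
          (by rw [show c = c' from heq]; exact hc') )
    simp only [PySem.Dict.update] at h2
    calc List.foldl (fun acc p => acc.insert p.1 p.2) ((PySem.Dict.mk acc).insert c (f c))
          (cs.map (fun c => (c, f c)))
        = List.foldl (fun acc p => acc.insert p.1 p.2) (PySem.Dict.mk (acc ++ [(c, f c)]))
          (cs.map (fun c => (c, f c))) := by rw [h1]
      _ = PySem.Dict.mk ((acc ++ [(c, f c)]) ++ cs.map (fun c => (c, f c))) := h2
      _ = PySem.Dict.mk (acc ++ (c, f c) :: cs.map (fun c => (c, f c))) := by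
          rw [List.append_assoc]; rfl

theorem pv_ofList_map {ν : Type} (cs : List String) (hnd : cs.Nodup) (f : String → ν) :
    PySem.Dict.ofList (cs.map (fun c => (c, f c))) = PySem.Dict.mk (cs.map (fun c => (c, f c))) := by
  have := pv_update_fresh cs f [] hnd (by simp)
  simpa [PySem.Dict.ofList, PySem.Dict.empty] using this

theorem pvTab_congr (cs : List String) (g g' : String → String → Int)
    (h : ∀ c1 c2, g c1 c2 = g' c1 c2) : pvTab cs g = pvTab cs g' := by
  have : g = g' := funext fun c1 => funext fun c2 => h c1 c2
  rw [this]

theorem pv_loop (cs : List String) (ps : List (String × String))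
    (hp : ∀ p ∈ ps, p.1 ∈ cs ∧ p.2 ∈ cs) :
    ∀ g : String → String → Int,
    ps.foldl (fun m p => m.modify p.2 PySem.Dict.empty (fun row => row.modify p.1 0 (· + 1)))
        (pvTab cs g)
      = pvTab cs (fun c1 c2 => g c1 c2 + ((ps.map Prod.swap).count (c1, c2) : Int)) := by
  induction ps with
  | nil =>
    intro g
    simp only [List.foldl_nil, List.map_nil]
    exact pvTab_congr _ _ _ (fun c1 c2 => by simp)
  | cons p ps ih =>
    intro g
    obtain ⟨h1, h2⟩ := hp p (by simp)
    have hstep :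
        (pvTab cs g).modify p.2 PySem.Dict.empty (fun row => row.modify p.1 0 (· + 1))
          = pvTab cs (fun c1 c2 => if c1 = p.2 ∧ c2 = p.1 then g c1 c2 + 1 else g c1 c2) := by
      unfold pvTab
      rw [pv_modify_map cs _ p.2 h2]
      refine congrArg PySem.Dict.mk (List.map_congr_left ?_)
      intro c1 _
      by_cases hc : c1 = p.2
      · rw [if_pos hc, pv_modify_map cs _ p.1 h1]
        congr 1
        exact congrArg PySem.Dict.mk (List.map_congr_left (by
          intro c2 _
          by_cases hd : c2 = p.1 <;> simp [hc, hd]))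
      · rw [if_neg hc]
        congr 1
        exact congrArg PySem.Dict.mk (List.map_congr_left (by
          intro c2 _
          simp [hc]))
    rw [List.foldl_cons, hstep, ih (fun p hp' => hp p (by simp [hp']))]
    apply pvTab_congr
    intro c1 c2
    simp only [List.map_cons, List.count_cons]
    by_cases hc : c1 = p.2 ∧ c2 = p.1
    · obtain ⟨e1, e2⟩ := hc
      simp [e1, e2, Prod.swap]
      omega
    · have hne : ¬ (p.swap == (c1, c2)) = true := by
        simp only [beq_iff_eq, Prod.swap, Prod.mk.injEq]
        intro ⟨a, b⟩
        exact hc ⟨a.symm, b.symm⟩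
      simp only [if_neg hc, hne]
      push_cast
      omega

theorem pv_range_pairs (v : List String) :
    (PySem.List.pyRange 0 ((v.length : Int) - 1) 1).map
        (fun i => (PySem.List.pyGetD v i "", PySem.List.pyGetD v (i + 1) ""))
      = v.zip (v.drop 1) := by
  apply List.ext_getElem
  · simp only [List.length_map, PySem.List.length_pyRange_one, List.length_zip,
      List.length_drop]
    omega
  · intro i h1 h2
    have hlen : i + 1 < v.length := by
      simp only [List.length_map, PySem.List.length_pyRange_one] at h1
      omega
    have hi : i < v.length := by omega
    rw [List.getElem_map, PySem.List.getElem_pyRange_one, List.getElem_zip]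
    have e1 : (0 : Int) + (i : Int) = ((i : Nat) : Int) := by omega
    have e2 : ((i : Int)) + 1 = (((i + 1 : Nat)) : Int) := by omega
    rw [e1, e2, PySem.List.pyGetD_natCast, PySem.List.pyGetD_natCast]
    rw [List.getD_eq_getElem v "" hlen, List.getD_eq_getElem v "" hi]
    congr 1
    rw [List.getElem_drop]
    congr 1
    omega

-- B's per-cell scan equals the count of (c1, c2) among the swapped pairs
theorem pv_cell (c1 c2 : String) (ps : List (String × String)) :
    ps.foldl (fun acc p => if p.2 == c1 && p.1 == c2 then acc + 1 else acc) (0 : Int)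
      = ((ps.map Prod.swap).count (c1, c2) : Int) := by
  suffices h : ∀ a : Int,
      ps.foldl (fun acc p => if p.2 == c1 && p.1 == c2 then acc + 1 else acc) a
        = a + ((ps.map Prod.swap).count (c1, c2) : Int) by
    simpa using h 0
  induction ps with
  | nil => intro a; simp
  | cons p ps ih =>
    intro a
    simp only [List.foldl_cons, List.map_cons, List.count_cons, ih]
    by_cases hc : p.2 = c1 ∧ p.1 = c2
    · obtain ⟨e1, e2⟩ := hc
      simp [e1, e2, Prod.swap]
      omega
    · have hb : (p.2 == c1 && p.1 == c2) = false := by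
        simp only [Bool.and_eq_false_iff, beq_eq_false_iff_ne, ne_eq]
        by_cases h1 : p.2 = c1
        · exact Or.inr (fun h2 => hc ⟨h1, h2⟩)
        · exact Or.inl h1
      have hne : ¬ (p.swap == (c1, c2)) = true := by
        simp only [beq_iff_eq, Prod.swap, Prod.mk.injEq]
        intro ⟨a', b'⟩
        exact hc ⟨a', b'⟩
      simp [hb, hne]

-- ===== VERDICT (by name: the statement is the Claim_ definition above) =====
theorem crear_matriz_transicion_spec : Claim_equal_crear_matriz_transicion := by
  intro v _
  unfold Spec_crear_matriz_transicion
  unfold crear_matriz_transicion crear_matriz_transicion_alt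
  simp only [PySem.List.slice_from_one, ← List.drop_one]
  set cs := PySem.List.sorted (PySem.Set.ofList v) (fun x => x) false
  have hnd : cs.Nodup :=
    ((PySem.List.sorted_perm (PySem.Set.ofList v) (fun x => x) false).nodup_iff).2
      (PySem.Set.nodup_ofList v)
  have hmem : ∀ x ∈ v, x ∈ cs := fun x hx =>
    (PySem.List.mem_sorted _ _ _ x).2 ((PySem.Set.mem_ofList v x).2 hx)
  have hzero : PySem.Dict.ofList (cs.map (fun c1 =>
      (c1, PySem.Dict.ofList (cs.map (fun c2 => (c2, (0 : Int)))))))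
      = pvTab cs (fun _ _ => 0) := by
    rw [pv_ofList_map cs hnd (fun c2 => (0 : Int))]
    exact pv_ofList_map cs hnd _
  rw [hzero]
  have hfold :
      (PySem.List.pyRange 0 ((v.length : Int) - 1) 1).foldl
        (fun m i => m.modify (PySem.List.pyGetD v (i + 1) "") PySem.Dict.empty
          (fun row => row.modify (PySem.List.pyGetD v i "") 0 (· + 1)))
        (pvTab cs (fun _ _ => 0))
      = (v.zip (v.drop 1)).foldl
        (fun m p => m.modify p.2 PySem.Dict.empty (fun row => row.modify p.1 0 (· + 1)))
        (pvTab cs (fun _ _ => 0)) := by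
    rw [← pv_range_pairs v, List.foldl_map]
  rw [hfold]
  have hp : ∀ p ∈ v.zip (v.drop 1), p.1 ∈ cs ∧ p.2 ∈ cs := by
    intro p hpz
    obtain ⟨ha, hb⟩ := List.of_mem_zip hpz
    exact ⟨hmem _ ha, hmem _ (List.mem_of_mem_drop hb)⟩
  rw [pv_loop cs _ hp (fun _ _ => 0)]
  unfold pvTab
  simp only [List.map_map]
  congr 1
  apply List.map_congr_left
  intro c1 _
  simp only [Function.comp_apply]
  congr 1
  apply List.map_congr_left
  intro c2 _
  rw [pv_cell]
  simp
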